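-- pv_equiv track=rewrite | github.com/physgorg/spin-chainz | pauliSDP.py | cyclic_hash
-- ===== SOURCE A (Python) =====
-- def cyclic_hash(s): # cyclic invariant hash function IMPORTANT FUNCTION
-- 	doubled_s = s + s
-- 	rotations = [doubled_s[i:i+len(s)] for i in range(len(s))]
-- 	smallest_rotation = min(rotations)
-- 	base = 7
-- 	mod = 10**9 + 7
-- 	hash_value = 0
-- 	for char in smallest_rotation:
-- 		# ord(char) converts the character to its ASCII value
-- 		hash_value = (hash_value * base + ord(char)) % mod
-- 	return hash_value
-- ===== SOURCE B (Python) =====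
-- def cyclic_hash(s):
--     # single scan keeping the best rotation START INDEX, comparing rotations
--     # char-by-char in the doubled string; no rotation strings are built.
--     n = len(s)
--     t = s + s
--     best = 0
--     i = 1
--     while i < n:
--         j = 0
--         while j < n and t[best + j] == t[i + j]:
--             j += 1
--         if j < n and t[i + j] < t[best + j]:
--             best = i
--         i += 1
--     mod = 10**9 + 7
--     h = 0
--     j = 0
--     while j < n:
--         h = (h * 7 + ord(t[best + j])) % mod
--         j += 1
--     return h
-- ===== Notes on version B (the rewrite author's own statement) =====
-- stated objective: alternative
-- what changed: A materialises all n rotation strings of the doubled string and takes min(); B never builds a rotation: it scans start indices once, keeping only the best start index and comparing candidate rotations character-by-character (with early exit) inside the doubled string, then hashes by index.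
-- crash fix: On the empty string A raises ValueError (min() of an empty sequence of rotations); B's loops are vacuous and it returns 0. — e.g. on cyclic_hash(""): A raises ValueError, B returns 0
import Mathlib
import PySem

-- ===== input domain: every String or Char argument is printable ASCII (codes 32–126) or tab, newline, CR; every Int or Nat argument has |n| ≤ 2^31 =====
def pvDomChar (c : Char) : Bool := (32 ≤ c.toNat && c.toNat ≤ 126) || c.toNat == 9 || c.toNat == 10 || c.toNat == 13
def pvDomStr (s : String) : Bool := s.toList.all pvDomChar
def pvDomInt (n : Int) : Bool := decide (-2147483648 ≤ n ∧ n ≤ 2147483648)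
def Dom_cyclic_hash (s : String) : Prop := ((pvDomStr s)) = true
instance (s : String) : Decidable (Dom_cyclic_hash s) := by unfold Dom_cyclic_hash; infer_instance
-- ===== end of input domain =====

-- B replaces A's "build all n rotation strings and min()" by a single scan that keeps only the
-- best rotation's start index, comparing rotations character-by-character inside the doubled
-- string (objective: alternative — no rotation strings are materialised).

-- ===== PORT A =====
def cyclic_hash (s : String) : Int :=
  let cs := s.toList
  let doubled := cs ++ cs
  let rotations := (PySem.List.pyRange 0 (cs.length : Int) 1).map
      (fun i => PySem.List.slice doubled (some i) (some (i + (cs.length : Int))))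
  match PySem.List.min? rotations (fun r => r) with
  | none => 0   -- min([]) raises ValueError in Python: s = "" is outside Pre_
  | some smallest =>
      smallest.foldl (fun h c => PySem.Int.mod (h * 7 + (c.toNat : Int)) 1000000007) 0

-- ===== PORT B =====
-- inner while loop of Source B: first offset j (from j upward) with j = n or t[b+j] ≠ t[i+j]
def pvMism (t : List Char) (n b i j : Nat) : Nat :=
  if j < n then
    if PySem.List.pyGetD t ((b + j : Nat) : Int) ' ' = PySem.List.pyGetD t ((i + j : Nat) : Int) ' '
    then pvMism t n b i (j + 1) else j
  else j
termination_by n - j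

-- the body comparison "j < n and t[i+j] < t[best+j]" of Source B
def pvLt (t : List Char) (n b i : Nat) : Bool :=
  let j := pvMism t n b i 0
  decide (j < n) && decide (PySem.List.pyGetD t ((i + j : Nat) : Int) ' ' < PySem.List.pyGetD t ((b + j : Nat) : Int) ' ')

-- outer while loop of Source B
def pvBestLoop (t : List Char) (n best i : Nat) : Nat :=
  if i < n then pvBestLoop t n (if pvLt t n best i then i else best) (i + 1) else best
termination_by n - i

-- hash while loop of Source B
def pvHashLoop (t : List Char) (n best j : Nat) (h : Int) : Int :=
  if j < n then
    pvHashLoop t n best (j + 1)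
      (PySem.Int.mod (h * 7 + ((PySem.List.pyGetD t ((best + j : Nat) : Int) ' ').toNat : Int)) 1000000007)
  else h
termination_by n - j

def cyclic_hash_alt (s : String) : Int :=
  let cs := s.toList
  let n := cs.length
  let t := cs ++ cs
  let best := pvBestLoop t n 0 1
  pvHashLoop t n best 0 0

-- ===== PRECONDITION & SPEC =====
-- Pre_ excludes only the empty string, on which A's min([]) raises ValueError.
def Pre_cyclic_hash (s : String) : Prop := s.toList ≠ []
instance (s : String) : Decidable (Pre_cyclic_hash s) := by unfold Pre_cyclic_hash; infer_instance
def pvWitness_cyclic_hash : String := "ba"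

-- On the empty string A raises ValueError (min of an empty sequence); B returns 0.
def Raises_cyclic_hash (s : String) : Prop := s.toList = []
instance (s : String) : Decidable (Raises_cyclic_hash s) := by unfold Raises_cyclic_hash; infer_instance
def pvRaiseWitness_cyclic_hash : String := ""
def pvRaiseWitnessOut_cyclic_hash : Int := 0

def Spec_cyclic_hash (s : String) (out : Int) : Prop := out = cyclic_hash_alt s
instance (s : String) (out : Int) : Decidable (Spec_cyclic_hash s out) := by unfold Spec_cyclic_hash; infer_instance

-- ===== CLAIM (what is proved, stated in full; the proofs are below) =====
def Claim_equal_cyclic_hash : Prop := ∀ (s : String), Dom_cyclic_hash s → Pre_cyclic_hash s → Spec_cyclic_hash s (cyclic_hash s)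
def Claim_raises_cyclic_hash : Prop := (∀ (s : String), Dom_cyclic_hash s → Raises_cyclic_hash s → ¬ Pre_cyclic_hash s) ∧ (Dom_cyclic_hash (pvRaiseWitness_cyclic_hash) ∧ Raises_cyclic_hash (pvRaiseWitness_cyclic_hash) ∧ cyclic_hash_alt (pvRaiseWitness_cyclic_hash) = pvRaiseWitnessOut_cyclic_hash)

-- ===== LEMMAS AND PROOFS =====

-- rotation of the doubled list starting at k (proof-only helper)
def pvRot (t : List Char) (n k : Nat) : List Char := (t.drop k).take n

theorem pvMism_lt_spec (m : Nat) : ∀ (t : List Char) (n b i j : Nat), n = j + m →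
    b + n ≤ t.length → i + n ≤ t.length →
    ((pvMism t n b i j < n ∧
       PySem.List.pyGetD t ((i + pvMism t n b i j : Nat) : Int) ' ' <
       PySem.List.pyGetD t ((b + pvMism t n b i j : Nat) : Int) ' ')
     ↔ pvRot t m (i + j) < pvRot t m (b + j)) := by
  induction m with
  | zero =>
    intro t n b i j hn hb hi
    have hm : pvMism t n b i j = j := by
      rw [pvMism]; simp [show ¬ (j < n) by omega]
    rw [hm]
    simp only [pvRot, List.take_zero]
    constructor
    · intro h; omega
    · intro h; exact absurd h (lt_irrefl _)
  | succ m ih =>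
    intro t n b i j hn hb hi
    have hjn : j < n := by omega
    have hbj : b + j < t.length := by omega
    have hij : i + j < t.length := by omega
    have eb : PySem.List.pyGetD t ((b + j : Nat) : Int) ' ' = t[b + j] := by
      rw [PySem.List.pyGetD_natCast, List.getD_eq_getElem t ' ' hbj]
    have ei : PySem.List.pyGetD t ((i + j : Nat) : Int) ' ' = t[i + j] := by
      rw [PySem.List.pyGetD_natCast, List.getD_eq_getElem t ' ' hij]
    have hrotb : pvRot t (m + 1) (b + j) = t[b + j] :: pvRot t m (b + j + 1) := by
      unfold pvRot; rw [List.drop_eq_getElem_cons hbj, List.take_succ_cons]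
    have hroti : pvRot t (m + 1) (i + j) = t[i + j] :: pvRot t m (i + j + 1) := by
      unfold pvRot; rw [List.drop_eq_getElem_cons hij, List.take_succ_cons]
    have hm : pvMism t n b i j =
        if t[b + j] = t[i + j] then pvMism t n b i (j + 1) else j := by
      rw [pvMism]; rw [if_pos hjn, eb, ei]
    rw [hm, hrotb, hroti, List.cons_lt_cons_iff]
    by_cases hc : t[b + j] = t[i + j]
    · rw [if_pos hc]
      have := ih t n b i (j + 1) (by omega) hb hi
      simp only [← Nat.add_assoc] at this
      rw [this]
      simp [hc]
    · rw [if_neg hc]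
      rw [eb, ei]
      constructor
      · intro h; exact Or.inl h.2
      · rintro (h | ⟨h1, h2⟩)
        · exact ⟨hjn, h⟩
        · exact absurd h1.symm hc

theorem pvLt_spec (t : List Char) (n b i : Nat) (hb : b + n ≤ t.length) (hi : i + n ≤ t.length) :
    pvLt t n b i = true ↔ pvRot t n i < pvRot t n b := by
  unfold pvLt
  simp only [Bool.and_eq_true, decide_eq_true_iff]
  have := pvMism_lt_spec n t n b i 0 (by omega) hb hi
  simpa using this

theorem pvBestLoop_spec (t : List Char) (n : Nat) (ht : t.length = 2 * n) :
    ∀ (k i best : Nat), k = n - i → best < n → (∀ r < i, pvRot t n best ≤ pvRot t n r) →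
      pvBestLoop t n best i < n ∧ ∀ r < n, pvRot t n (pvBestLoop t n best i) ≤ pvRot t n r := by
  intro k
  induction k with
  | zero =>
    intro i best hk hbest hinv
    have hni : ¬ i < n := by omega
    rw [pvBestLoop]
    simp only [hni, if_false]
    exact ⟨hbest, fun r hr => hinv r (by omega)⟩
  | succ k ih =>
    intro i best hk hbest hinv
    have hin : i < n := by omega
    rw [pvBestLoop]
    simp only [hin, if_true]
    by_cases hlt : pvLt t n best i = true
    · simp only [hlt, if_true]
      have hlt' : pvRot t n i < pvRot t n best :=
        (pvLt_spec t n best i (by omega) (by omega)).mp hlt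
      refine ih (i + 1) i (by omega) hin (fun r hr => ?_)
      rcases Nat.lt_succ_iff_lt_or_eq.mp hr with hr' | hr'
      · exact le_trans (le_of_lt hlt') (hinv r hr')
      · subst hr'; exact le_refl _
    · simp only [hlt]
      have hge : pvRot t n best ≤ pvRot t n i := by
        have := (pvLt_spec t n best i (by omega) (by omega)).not.mp (by simpa using hlt)
        exact le_of_not_gt this
      refine ih (i + 1) best (by omega) hbest (fun r hr => ?_)
      rcases Nat.lt_succ_iff_lt_or_eq.mp hr with hr' | hr'
      · exact hinv r hr'
      · subst hr'; exact hge

theorem pvHashLoop_spec (m : Nat) : ∀ (t : List Char) (n best j : Nat) (h : Int), n = j + m →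
    best + n ≤ t.length →
    pvHashLoop t n best j h =
      List.foldl (fun h c => PySem.Int.mod (h * 7 + (c.toNat : Int)) 1000000007) h (pvRot t m (best + j)) := by
  induction m with
  | zero =>
    intro t n best j h hn hb
    rw [pvHashLoop]
    simp [show ¬ (j < n) by omega, pvRot]
  | succ m ih =>
    intro t n best j h hn hb
    have hjn : j < n := by omega
    have hbj : best + j < t.length := by omega
    have eb : PySem.List.pyGetD t ((best + j : Nat) : Int) ' ' = t[best + j] := by
      rw [PySem.List.pyGetD_natCast, List.getD_eq_getElem t ' ' hbj]
    have hrot : pvRot t (m + 1) (best + j) = t[best + j] :: pvRot t m (best + j + 1) := by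
      unfold pvRot; rw [List.drop_eq_getElem_cons hbj, List.take_succ_cons]
    rw [pvHashLoop]
    simp only [hjn, if_true, eb, hrot, List.foldl_cons]
    have := ih t n best (j + 1) (PySem.Int.mod (h * 7 + (t[best + j].toNat : Int)) 1000000007) (by omega) hb
    simpa [← Nat.add_assoc] using this

-- ===== VERDICT (by name: the statement is the Claim_ definition above) =====
theorem pvBridge (xs : List (List Char)) : (PySem.List.min? xs (fun r => r) : Option (List Char)) =
    @PySem.List.min? (List Char) (List Char) List.instLinearOrder.toLT
      LinearOrder.toDecidableLT xs (fun r => r) := by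
  congr 1

theorem pvMain (cs : List Char) (h : cs ≠ []) :
    (match PySem.List.min?
        ((PySem.List.pyRange 0 (cs.length : Int) 1).map
          (fun i => PySem.List.slice (cs ++ cs) (some i) (some (i + (cs.length : Int)))))
        (fun r => r) with
     | none => 0
     | some smallest =>
        smallest.foldl (fun h c => PySem.Int.mod (h * 7 + (c.toNat : Int)) 1000000007) 0)
    = pvHashLoop (cs ++ cs) cs.length (pvBestLoop (cs ++ cs) cs.length 0 1) 0 0 := by
  set n := cs.length with hn
  set t := cs ++ cs with ht
  have hn0 : 0 < n := List.length_pos_iff.mpr h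
  have htlen : t.length = 2 * n := by simp [ht, ← hn]; omega
  have hrots : (PySem.List.pyRange 0 (n : Int) 1).map
      (fun i => PySem.List.slice t (some i) (some (i + (n : Int))))
      = (List.range n).map (fun k => pvRot t n k) := by
    rw [PySem.List.pyRange_zero_nat, List.map_map]
    refine List.map_congr_left (fun k _ => ?_)
    simp only [Function.comp, PySem.List.slice_natCast_add, pvRot]
  rw [hrots]
  obtain ⟨hbn, hbmin⟩ := pvBestLoop_spec t n htlen (n - 1) 1 0 rfl hn0
      (fun r hr => by interval_cases r; exact le_refl _)
  obtain ⟨m, hm⟩ : ∃ m, PySem.List.min? ((List.range n).map (fun k => pvRot t n k)) (fun r => r) = some m := by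
    cases hcase : PySem.List.min? ((List.range n).map (fun k => pvRot t n k)) (fun r => r) with
    | none =>
        rw [PySem.List.min?_eq_none_iff] at hcase
        simp [List.range_eq_nil] at hcase
        omega
    | some m => exact ⟨m, rfl⟩
  have hm' := (pvBridge ((List.range n).map (fun k => pvRot t n k))).symm.trans hm
  have hmem := @PySem.List.min?_mem (List Char) (List Char) List.instLinearOrder.toLT
      LinearOrder.toDecidableLT _ _ _ hm'
  have hismin := PySem.List.min?_isMin hm' 
  obtain ⟨k, hk, hkm⟩ : ∃ k, k < n ∧ pvRot t n k = m := by
    simpa [List.mem_map, List.mem_range] using hmem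
  have hmeq : m = pvRot t n (pvBestLoop t n 0 1) := by
    refine le_antisymm ?_ ?_
    · exact hismin _ (List.mem_map.mpr ⟨_, List.mem_range.mpr hbn, rfl⟩)
    · rw [← hkm]; exact hbmin k hk
  rw [hm]
  simp only
  rw [hmeq]
  rw [pvHashLoop_spec n t n (pvBestLoop t n 0 1) 0 0 (by omega) (by omega)]
  simp

theorem cyclic_hash_spec : Claim_equal_cyclic_hash := by
  intro s _ hpre
  unfold Spec_cyclic_hash cyclic_hash cyclic_hash_alt
  exact pvMain s.toList hpre

@[simp] theorem cyclic_hash_raises : Claim_raises_cyclic_hash := by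
  unfold Claim_raises_cyclic_hash
  refine ⟨fun s _ hr hp => hp hr, by decide, by decide, ?_⟩
  have e : ("" : String).toList = [] := by decide
  show cyclic_hash_alt "" = 0
  unfold cyclic_hash_alt
  simp only [e, List.length_nil, List.append_nil]
  rw [pvBestLoop, pvHashLoop]
  simp
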